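-- pv_equiv track=rewrite | github.com/rubeeny/DMAN | model.py | sort_eta
-- ===== SOURCE A (Python) =====
-- def sort_eta(pre_eta_, length):
--     pred_order_etas=[]
--     for eta,len_num in zip(pre_eta_,length):
--         dic_eta=dict()
--         eta=eta[:len_num]
--         for i,e in enumerate(eta):
--             dic_eta[i]=e
--         pred_order_eta= [tup[0] for tup in sorted(dic_eta.items(), key=lambda d: d[1])]
--         pred_order_eta_final = [pred_order_eta.index(j) for j in range(len_num)]
--         pred_order_etas.append(pred_order_eta_final)
--     return  pred_order_etas
-- ===== SOURCE B (Python) =====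
-- def sort_eta(pre_eta_, length):
--     pred_order_etas = []
--     for eta, len_num in zip(pre_eta_, length):
--         eta = eta[:len_num]
--         row = []
--         for i in range(len_num):
--             v = eta[i]
--             less = sum(1 for x in eta if x < v)
--             earlier_eq = sum(1 for j in range(i) if eta[j] == v)
--             row.append(less + earlier_eq)
--         pred_order_etas.append(row)
--     return pred_order_etas
-- ===== Notes on version B (the rewrite author's own statement) =====
-- stated objective: alternative
-- what changed: B replaces A's per-row build-a-dict, stable-sort by value, and inverse-permutation-via-repeated-.index pipeline by direct rank counting: rank[i] = #{x in row : x < row[i]} + #{j < i : row[j] == row[i]}, which reproduces stable tie-breaking with no sort, no dict and no .index scans.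
import Mathlib
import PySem

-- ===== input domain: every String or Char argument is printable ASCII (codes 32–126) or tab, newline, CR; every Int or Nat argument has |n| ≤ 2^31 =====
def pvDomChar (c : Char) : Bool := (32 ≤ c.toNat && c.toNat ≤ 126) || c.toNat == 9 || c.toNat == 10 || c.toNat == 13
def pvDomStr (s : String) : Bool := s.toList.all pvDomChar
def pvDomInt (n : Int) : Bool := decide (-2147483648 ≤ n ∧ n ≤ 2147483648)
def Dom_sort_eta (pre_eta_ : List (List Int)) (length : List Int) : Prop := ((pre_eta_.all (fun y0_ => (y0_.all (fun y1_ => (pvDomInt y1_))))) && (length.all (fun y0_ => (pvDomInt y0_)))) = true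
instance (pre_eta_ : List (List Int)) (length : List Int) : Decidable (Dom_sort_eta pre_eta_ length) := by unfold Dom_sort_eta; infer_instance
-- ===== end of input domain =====

-- B replaces A's sort-then-invert-permutation rank computation by direct comparison counting
-- (rank[i] = #{x < e[i]} + #{earlier equal}); objective: alternative decomposition, same O(n^2) cost.


-- ===== PORT A =====
def sort_eta (pre_eta_ : List (List Int)) (length : List Int) : List (List Int) :=
  (pre_eta_.zip length).foldl (fun pred_order_etas p =>
    let eta := PySem.List.slice p.1 none (some p.2)
    let dic_eta := (PySem.List.enumerate eta 0).foldl
      (fun d q => PySem.Dict.insert d q.1 q.2) PySem.Dict.empty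
    let pred_order_eta := (PySem.List.sorted dic_eta.items (fun d => d.2) false).map (fun t => t.1)
    -- '.index(j)' raises ValueError when j is absent; Pre_sort_eta rules that out (getD 0 is never reached there)
    let pred_order_eta_final := (PySem.List.pyRange 0 p.2 1).map
      (fun j => (((PySem.List.index? pred_order_eta j).getD 0 : Nat) : Int))
    pred_order_etas ++ [pred_order_eta_final]) []

-- ===== PORT B =====
def sort_eta_alt (pre_eta_ : List (List Int)) (length : List Int) : List (List Int) :=
  (pre_eta_.zip length).foldl (fun out p =>
    let eta := PySem.List.slice p.1 none (some p.2)
    -- 'eta[i]' raises IndexError when i is out of range; Pre_sort_eta rules that out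
    let row := (PySem.List.pyRange 0 p.2 1).map (fun i =>
      let v := PySem.List.pyGetD eta i 0
      let less := (eta.countP (fun x => decide (x < v)) : Int)
      let earlier_eq := ((PySem.List.pyRange 0 i 1).countP (fun j => PySem.List.pyGetD eta j 0 == v) : Int)
      less + earlier_eq)
    out ++ [row]) []

-- ===== PRECONDITION & SPEC =====
-- Pre_ excludes exactly the inputs where some requested length exceeds the row's actual length:
-- there Python A raises ValueError (.index on a missing index) and Python B raises IndexError.
def Pre_sort_eta (pre_eta_ : List (List Int)) (length : List Int) : Prop :=
  ∀ p ∈ pre_eta_.zip length, p.2 ≤ (p.1.length : Int)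
instance (pre_eta_ : List (List Int)) (length : List Int) : Decidable (Pre_sort_eta pre_eta_ length) := by unfold Pre_sort_eta; infer_instance

def pvWitness_sort_eta : List (List Int) × List Int := ([[3, 1, 3, 2], [5, 5]], [4, 2])

def Spec_sort_eta (pre_eta_ : List (List Int)) (length : List Int) (out : List (List Int)) : Prop := out = sort_eta_alt pre_eta_ length
instance (pre_eta_ : List (List Int)) (length : List Int) (out : List (List Int)) : Decidable (Spec_sort_eta pre_eta_ length out) := by unfold Spec_sort_eta; infer_instance

-- ===== CLAIM (what is proved, stated in full; the proofs are below) =====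
def Claim_equal_sort_eta : Prop := ∀ (pre_eta_ : List (List Int)) (length : List Int), Dom_sort_eta pre_eta_ length → Pre_sort_eta pre_eta_ length → Spec_sort_eta pre_eta_ length (sort_eta pre_eta_ length)

-- ===== LEMMAS AND PROOFS =====

-- the stable-sort order on (original index, value) pairs: smaller value first, ties by smaller index
abbrev pvR (a b : Int × Int) : Prop := a.2 < b.2 ∨ (a.2 = b.2 ∧ a.1 < b.1)

lemma pvR_asymm {a b : Int × Int} (h : pvR a b) : ¬ pvR b a := by
  unfold pvR at *; omega

lemma pvR_irrefl (a : Int × Int) : ¬ pvR a a := by unfold pvR; omega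

lemma insertBy_pairwise_pvR (x : Int × Int) (acc : List (Int × Int))
    (h : acc.Pairwise pvR) (hx : ∀ a ∈ acc, a.1 < x.1) :
    (PySem.List.insertBy (fun a b => decide (a.2 < b.2)) x acc).Pairwise pvR := by
  induction acc with
  | nil => simp [PySem.List.insertBy]
  | cons y ys ih =>
    rw [List.pairwise_cons] at h
    by_cases hlt : x.2 < y.2
    · simp only [PySem.List.insertBy, hlt, decide_true]
      constructor
      · intro z hz
        rcases List.mem_cons.mp hz with rfl | hz
        · exact Or.inl hlt
        · have := h.1 z hz
          unfold pvR at this ⊢; omega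
      · exact List.pairwise_cons.mpr h
    · simp only [PySem.List.insertBy, hlt, decide_false]
      constructor
      · intro z hz
        rw [PySem.List.mem_insertBy] at hz
        rcases hz with rfl | hz
        · have := hx y (by simp)
          unfold pvR; omega
        · exact h.1 z hz
      · exact ih h.2 (fun a ha => hx a (by simp [ha]))

lemma foldl_insertBy_pairwise_pvR (L : List (Int × Int)) (acc : List (Int × Int))
    (hL : L.Pairwise (fun p q => p.1 < q.1))
    (hacc : acc.Pairwise pvR)
    (hcross : ∀ x ∈ L, ∀ a ∈ acc, a.1 < x.1) :
    (L.foldl (fun acc x => PySem.List.insertBy (fun a b => decide (a.2 < b.2)) x acc) acc).Pairwise pvR := by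
  induction L generalizing acc with
  | nil => simpa using hacc
  | cons x L ih =>
    rw [List.pairwise_cons] at hL
    simp only [List.foldl_cons]
    exact ih _ hL.2
      (insertBy_pairwise_pvR x acc hacc (fun a ha => hcross x (by simp) a ha))
      (fun y hy a ha => by
        rcases (PySem.List.mem_insertBy _ _ _ _).mp ha with rfl | ha
        · exact hL.1 y hy
        · exact hcross y (by simp [hy]) a ha)

lemma sorted_pairwise_pvR (L : List (Int × Int)) (hL : L.Pairwise (fun p q => p.1 < q.1)) :
    (PySem.List.sorted L (fun d => d.2) false).Pairwise pvR := by
  rw [PySem.List.sorted_eq_foldl_insertBy]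
  exact foldl_insertBy_pairwise_pvR L [] hL (by simp) (by simp)

lemma index?_map_fst_eq_countP (s : List (Int × Int)) (t : Int × Int)
    (hs : s.Pairwise pvR) (ht : t ∈ s)
    (hinj : ∀ a ∈ s, a.1 = t.1 → a = t) :
    PySem.List.index? (s.map (fun p => p.1)) t.1 = some (s.countP (fun p => decide (pvR p t))) := by
  induction s with
  | nil => cases ht
  | cons a s ih =>
    rw [List.pairwise_cons] at hs
    by_cases hat : a = t
    · subst hat
      simp only [List.map_cons, PySem.List.index?_cons_self]
      have hz : s.countP (fun p => decide (pvR p a)) = 0 := by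
        rw [List.countP_eq_zero]
        intro p hp
        simpa using pvR_asymm (hs.1 p hp)
      rw [List.countP_cons, hz]
      simp [pvR_irrefl a]
    · have htm : t ∈ s := by
        rcases List.mem_cons.mp ht with h | h
        · exact absurd h.symm hat
        · exact h
      have hne : a.1 ≠ t.1 := fun h => hat (hinj a (by simp) h)
      rw [List.map_cons, PySem.List.index?_cons_of_ne _ hne,
        ih hs.2 htm (fun b hb => hinj b (by simp [hb]))]
      have hRat : pvR a t := hs.1 t htm
      simp [hRat, Nat.add_comm]

lemma countP_or_disjoint (l : List (Int × Int)) (P Q : Int × Int → Prop)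
    [DecidablePred P] [DecidablePred Q] (hd : ∀ x ∈ l, ¬ (P x ∧ Q x)) :
    l.countP (fun x => decide (P x ∨ Q x)) =
      l.countP (fun x => decide (P x)) + l.countP (fun x => decide (Q x)) := by
  induction l with
  | nil => simp
  | cons a l ih =>
    have hih := ih (fun x hx => hd x (by simp [hx]))
    have ha := hd a (by simp)
    rcases Decidable.em (P a) with hP | hP <;> rcases Decidable.em (Q a) with hQ | hQ
    · exact absurd ⟨hP, hQ⟩ ha
    all_goals simp only [List.countP_cons, hih, hP, hQ]
    all_goals simp
    all_goals omega

-- the per-row equality: A's rank row equals B's counting row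
lemma row_eq (e : List Int) (n : Int) (hn : n = (e.length : Int)) :
    (PySem.List.pyRange 0 n 1).map
      (fun j => (((PySem.List.index?
          ((PySem.List.sorted
            ((PySem.List.enumerate e 0).foldl (fun d q => PySem.Dict.insert d q.1 q.2)
              PySem.Dict.empty).items (fun d => d.2) false).map (fun t => t.1)) j).getD 0 : Nat) : Int))
    = (PySem.List.pyRange 0 n 1).map (fun i =>
        let v := PySem.List.pyGetD e i 0
        ((e.countP (fun x => decide (x < v)) : Int)) +
        (((PySem.List.pyRange 0 i 1).countP (fun j => PySem.List.pyGetD e j 0 == v) : Int))) := by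
  -- the dict built from enumerate has exactly the enumerate pairs as items
  have hitems : ((PySem.List.enumerate e 0).foldl (fun d q => PySem.Dict.insert d q.1 q.2)
      (PySem.Dict.empty : PySem.Dict Int Int)).items = PySem.List.enumerate e 0 := by
    have := PySem.Dict.items_foldl_insert_fresh (PySem.List.enumerate e 0)
      (fun q => q.1) (fun q => q.2) (PySem.Dict.empty : PySem.Dict Int Int)
      (fun a _ => PySem.Dict.contains_empty a.1)
      (by rw [PySem.List.map_fst_enumerate]; exact PySem.List.nodup_pyRange_one 0 (0 + e.length))
    simpa using this
  rw [hitems]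
  apply List.map_congr_left
  intro j hj
  rw [PySem.List.mem_pyRange_one] at hj
  set s := PySem.List.sorted (PySem.List.enumerate e 0) (fun d => d.2) false with hs
  set k := j.toNat with hk
  have hkj : (k : Int) = j := Int.toNat_of_nonneg hj.1
  have hke : k < e.length := by omega
  set v := e[k] with hv
  have hvd : PySem.List.pyGetD e j 0 = v := by
    rw [PySem.List.pyGetD_eq_getElem e 0 hj.1 (by omega)]
  set t : Int × Int := (j, v) with hts
  have htE : t ∈ PySem.List.enumerate e 0 := by
    rw [PySem.List.mem_enumerate_iff]
    exact ⟨k, hke, by simp [hts, hv, hkj.symm]⟩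
  have hts' : t ∈ s := (PySem.List.mem_sorted _ _ _ _).mpr htE
  have hinj : ∀ a ∈ s, a.1 = t.1 → a = t := by
    intro a ha h1
    rw [PySem.List.mem_sorted, PySem.List.mem_enumerate_iff] at ha
    obtain ⟨k', hk', rfl⟩ := ha
    simp only [zero_add] at h1 ⊢
    have : k' = k := by simp [hts] at h1; omega
    subst this; simp [hts, hv, hkj.symm]
  have hpw : s.Pairwise pvR := sorted_pairwise_pvR _ (PySem.List.pairwise_lt_enumerate e 0)
  rw [index?_map_fst_eq_countP s t hpw hts' hinj, Option.getD_some]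
  -- move the count from the sorted list back to the enumerate list
  have hperm : s.countP (fun p => decide (pvR p t)) =
      (PySem.List.enumerate e 0).countP (fun p => decide (pvR p t)) :=
    (PySem.List.sorted_perm _ _ _).countP_eq _
  rw [hperm]
  -- split the disjunction into the two disjoint counts
  have hsplit : (PySem.List.enumerate e 0).countP (fun p => decide (pvR p t)) =
      (PySem.List.enumerate e 0).countP (fun p => decide (p.2 < v)) +
      (PySem.List.enumerate e 0).countP (fun p => decide (p.2 = v ∧ p.1 < j)) := by
    have := countP_or_disjoint (PySem.List.enumerate e 0)
      (fun p => p.2 < v) (fun p => p.2 = v ∧ p.1 < j) (fun x _ => by omega)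
    rw [← this]
  rw [hsplit]
  -- first count: over the values
  have hc1 : (PySem.List.enumerate e 0).countP (fun p => decide (p.2 < v)) =
      e.countP (fun x => decide (x < v)) := by
    conv_rhs => rw [← PySem.List.map_snd_enumerate e 0]
    rw [List.countP_map]; rfl
  -- second count: over the indices below j
  have hc2 : (PySem.List.enumerate e 0).countP (fun p => decide (p.2 = v ∧ p.1 < j)) =
      (PySem.List.pyRange 0 j 1).countP (fun i => PySem.List.pyGetD e i 0 == v) := by
    rw [PySem.List.enumerate_eq_map_pyRange e 0, List.countP_map]
    have hlen : PySem.List.len e = n := by simp [PySem.List.len, hn]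
    rw [hlen, PySem.List.pyRange_one_append 0 j n hj.1 (le_of_lt hj.2), List.countP_append]
    have h2 : (PySem.List.pyRange j n 1).countP
        ((fun p => decide (p.2 = v ∧ p.1 < j)) ∘ (fun i => (i, PySem.List.pyGetD e i 0))) = 0 := by
      rw [List.countP_eq_zero]
      intro i hi
      rw [PySem.List.mem_pyRange_one] at hi
      simp; omega
    rw [h2, Nat.add_zero]
    apply List.countP_congr
    intro i hi
    rw [PySem.List.mem_pyRange_one] at hi
    simp [Function.comp, beq_iff_eq]
    omega
  rw [hc1, hc2, hvd]
  push_cast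
  ring

-- ===== VERDICT (by name: the statement is the Claim_ definition above) =====
theorem sort_eta_spec : Claim_equal_sort_eta := by
  intro pre_eta_ length _ hpre
  unfold Spec_sort_eta sort_eta sort_eta_alt
  rw [PySem.List.foldl_append_singleton_eq_map, PySem.List.foldl_append_singleton_eq_map]
  simp only [List.nil_append]
  apply List.map_congr_left
  intro p hp
  have hple := hpre p hp
  by_cases hneg : p.2 < 0
  · simp [PySem.List.pyRange_one_eq_nil (le_of_lt hneg)]
  · rw [Int.not_lt] at hneg
    have hlen : p.2 = ((PySem.List.slice p.1 none (some p.2)).length : Int) := by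
      rw [PySem.List.slice_to p.1 hneg, List.length_take]
      omega
    exact row_eq _ p.2 hlen
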